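-- pv_equiv track=rewrite | github.com/leecg39/videogen1.4 | scripts/build-deep-blue-layouts.py | count_grammar
-- ===== SOURCE A (Python) =====
-- def count_grammar(stack_root):
--     """비카드(focal-only) vs 카드(컨테이너) 판별"""
--     children = stack_root.get("children", [])
--     has_container = any(c.get("type") in ("Split","Grid","Stack","FrameBox") for c in children)
--     if has_container:
--         # split-2col?
--         for c in children:
--             if c.get("type") == "Split": return "split"
--         for c in children:
--             if c.get("type") == "Grid": return "grid"
--         for c in children:
--             if c.get("type") == "Stack": return "stack"
--         return "compound"
--     return "focal-only"
-- ===== SOURCE B (Python) =====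
-- def count_grammar(stack_root):
--     """비카드(focal-only) vs 카드(컨테이너) 판별"""
--     # one-pass max-priority reduction instead of repeated scans
--     rank = {"Split": 4, "Grid": 3, "Stack": 2, "FrameBox": 1}
--     best = 0
--     for c in stack_root.get("children", []):
--         best = max(best, rank.get(c.get("type"), 0))
--     return ["focal-only", "compound", "stack", "grid", "split"][best]
-- ===== Notes on version B (the rewrite author's own statement) =====
-- stated objective: alternative
-- what changed: B replaces A's any-scan plus three early-exit forward scans with a single-pass max reduction: each child type is mapped to a numeric priority (Split=4, Grid=3, Stack=2, FrameBox=1, other=0), one fold keeps the maximum, and the answer is read from a lookup table indexed by that maximum.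
import Mathlib
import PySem

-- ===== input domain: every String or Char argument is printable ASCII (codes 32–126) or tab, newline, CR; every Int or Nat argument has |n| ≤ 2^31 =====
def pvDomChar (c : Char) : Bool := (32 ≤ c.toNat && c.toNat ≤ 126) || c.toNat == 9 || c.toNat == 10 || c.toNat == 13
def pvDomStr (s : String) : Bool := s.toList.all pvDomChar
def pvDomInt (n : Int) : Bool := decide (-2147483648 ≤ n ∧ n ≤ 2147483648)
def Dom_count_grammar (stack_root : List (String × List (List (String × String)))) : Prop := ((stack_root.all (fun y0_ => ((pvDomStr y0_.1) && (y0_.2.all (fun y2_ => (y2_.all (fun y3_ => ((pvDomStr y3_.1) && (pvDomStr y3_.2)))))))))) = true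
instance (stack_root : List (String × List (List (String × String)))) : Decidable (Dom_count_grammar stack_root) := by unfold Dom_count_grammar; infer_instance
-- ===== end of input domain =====

-- B replaces A's any-scan plus three early-exit forward scans with one single-pass
-- max-priority reduction (Split=4, Grid=3, Stack=2, FrameBox=1, other=0) and a table
-- lookup on the maximum (alternative, same cost).

-- shared dict-lookup helpers (both Pythons call .get the same way; first match = Python dict)
def pvChildren (stack_root : List (String × List (List (String × String)))) :
    List (List (String × String)) :=
  ((stack_root.find? (fun p => p.1 == "children")).map (·.2)).getD []

def pvType (c : List (String × String)) : Option String :=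
  (c.find? (fun p => p.1 == "type")).map (·.2)

-- ===== PORT A =====
def count_grammar (stack_root : List (String × List (List (String × String)))) : String :=
  let children := pvChildren stack_root
  let has_container := children.any (fun c =>
    pvType c == some "Split" || pvType c == some "Grid" ||
    pvType c == some "Stack" || pvType c == some "FrameBox")
  if has_container then
    -- each `for … return` scan is an early-exit forward scan = List.find?
    match children.find? (fun c => pvType c == some "Split") with
    | some _ => "split"
    | none =>
      match children.find? (fun c => pvType c == some "Grid") with
      | some _ => "grid"
      | none =>
        match children.find? (fun c => pvType c == some "Stack") with
        | some _ => "stack"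
        | none => "compound"
  else "focal-only"

-- ===== PORT B =====
-- rank.get(c.get("type"), 0): the literal dict lookup of Source B
def pvRank (t : Option String) : Nat :=
  if t = some "Split" then 4
  else if t = some "Grid" then 3
  else if t = some "Stack" then 2
  else if t = some "FrameBox" then 1
  else 0

def count_grammar_alt (stack_root : List (String × List (List (String × String)))) : String :=
  let best := (pvChildren stack_root).foldl (fun b c => max b (pvRank (pvType c))) 0
  -- indexing the 5-element table with best ∈ [0,4] (always in range in Python)
  ["focal-only", "compound", "stack", "grid", "split"].getD best ""

-- ===== PRECONDITION & SPEC =====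
def Spec_count_grammar (stack_root : List (String × List (List (String × String)))) (out : String) : Prop := out = count_grammar_alt stack_root
instance (stack_root : List (String × List (List (String × String)))) (out : String) : Decidable (Spec_count_grammar stack_root out) := by unfold Spec_count_grammar; infer_instance

-- ===== CLAIM (what is proved, stated in full; the proofs are below) =====
def Claim_equal_count_grammar : Prop := ∀ (stack_root : List (String × List (List (String × String)))), Dom_count_grammar stack_root → Spec_count_grammar stack_root (count_grammar stack_root)

-- ===== LEMMAS AND PROOFS =====

-- characterizations of the fold's maximum
lemma foldl_max_le_iff (l : List (List (String × String))) (b k : Nat) :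
    l.foldl (fun a c => max a (pvRank (pvType c))) b ≤ k ↔
      b ≤ k ∧ ∀ c ∈ l, pvRank (pvType c) ≤ k := by
  induction l generalizing b with
  | nil => simp
  | cons x xs ih => simp [List.foldl_cons, ih]; tauto

lemma le_foldl_max_iff (l : List (List (String × String))) (b k : Nat) :
    k ≤ l.foldl (fun a c => max a (pvRank (pvType c))) b ↔
      k ≤ b ∨ ∃ c ∈ l, k ≤ pvRank (pvType c) := by
  induction l generalizing b with
  | nil => simp
  | cons x xs ih =>
    simp only [List.foldl_cons, ih, le_max_iff, List.mem_cons]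
    constructor
    · rintro ((h | h) | ⟨c, hc, h⟩)
      · exact Or.inl h
      · exact Or.inr ⟨x, Or.inl rfl, h⟩
      · exact Or.inr ⟨c, Or.inr hc, h⟩
    · rintro (h | ⟨c, (rfl | hc), h⟩)
      · exact Or.inl (Or.inl h)
      · exact Or.inl (Or.inr h)
      · exact Or.inr ⟨c, hc, h⟩

lemma find?_none_iff (children : List (List (String × String))) (t : Option String) :
    children.find? (fun c => pvType c == t) = none ↔ ¬ ∃ c ∈ children, pvType c = t := by
  simp [List.find?_eq_none]

lemma rank_le_four (t : Option String) : pvRank t ≤ 4 := by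
  unfold pvRank; split_ifs <;> omega

lemma four_le_rank_iff (t : Option String) : 4 ≤ pvRank t ↔ t = some "Split" := by
  unfold pvRank; split_ifs with h1 h2 h3 h4 <;> simp_all

lemma three_le_rank_iff (t : Option String) :
    3 ≤ pvRank t ↔ t = some "Split" ∨ t = some "Grid" := by
  unfold pvRank; split_ifs with h1 h2 h3 h4 <;> simp_all

lemma two_le_rank_iff (t : Option String) :
    2 ≤ pvRank t ↔ t = some "Split" ∨ t = some "Grid" ∨ t = some "Stack" := by
  unfold pvRank; split_ifs with h1 h2 h3 h4 <;> simp_all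

lemma one_le_rank_iff (t : Option String) :
    1 ≤ pvRank t ↔ t = some "Split" ∨ t = some "Grid" ∨ t = some "Stack" ∨ t = some "FrameBox" := by
  unfold pvRank; split_ifs with h1 h2 h3 h4 <;> simp_all

lemma best_eq (children : List (List (String × String)))
    (k : Nat)
    (hle : ∀ c ∈ children, pvRank (pvType c) ≤ k)
    (hge : ∃ c ∈ children, k ≤ pvRank (pvType c)) :
    children.foldl (fun a c => max a (pvRank (pvType c))) 0 = k := by
  apply Nat.le_antisymm
  · exact (foldl_max_le_iff children 0 k).mpr ⟨Nat.zero_le _, hle⟩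
  · exact (le_foldl_max_iff children 0 k).mpr (Or.inr hge)

-- ===== VERDICT (by name: the statement is the Claim_ definition above) =====
theorem count_grammar_spec : Claim_equal_count_grammar := by
  intro sr _
  unfold Spec_count_grammar count_grammar count_grammar_alt
  generalize pvChildren sr = children
  by_cases hS : ∃ c ∈ children, pvType c = some "Split"
  · have hany : children.any (fun c =>
        pvType c == some "Split" || pvType c == some "Grid" ||
        pvType c == some "Stack" || pvType c == some "FrameBox") = true := by
      rcases hS with ⟨c, hc, ht⟩; exact List.any_eq_true.mpr ⟨c, hc, by simp [ht]⟩
    obtain ⟨v, hv⟩ := Option.isSome_iff_exists.mp (by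
      rw [← Option.ne_none_iff_isSome, Ne, find?_none_iff]; exact not_not.mpr hS)
    have hbest : children.foldl (fun a c => max a (pvRank (pvType c))) 0 = 4 :=
      best_eq children 4 (fun c _ => rank_le_four _)
        (hS.imp fun c ⟨hc, ht⟩ => ⟨hc, (four_le_rank_iff _).mpr ht⟩)
    simp [hany, hv, hbest]
  · have hfS := (find?_none_iff children (some "Split")).mpr hS
    by_cases hG : ∃ c ∈ children, pvType c = some "Grid"
    · have hany : children.any (fun c =>
          pvType c == some "Split" || pvType c == some "Grid" ||
          pvType c == some "Stack" || pvType c == some "FrameBox") = true := by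
        rcases hG with ⟨c, hc, ht⟩; exact List.any_eq_true.mpr ⟨c, hc, by simp [ht]⟩
      obtain ⟨v, hv⟩ := Option.isSome_iff_exists.mp (by
        rw [← Option.ne_none_iff_isSome, Ne, find?_none_iff]; exact not_not.mpr hG)
      have hbest : children.foldl (fun a c => max a (pvRank (pvType c))) 0 = 3 :=
        best_eq children 3
          (fun c hc => by
            by_contra h
            exact hS ⟨c, hc, ((four_le_rank_iff _).mp (by omega))⟩)
          (hG.imp fun c ⟨hc, ht⟩ => ⟨hc, (three_le_rank_iff _).mpr (Or.inr ht)⟩)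
      simp [hany, hfS, hv, hbest]
    · have hfG := (find?_none_iff children (some "Grid")).mpr hG
      by_cases hT : ∃ c ∈ children, pvType c = some "Stack"
      · have hany : children.any (fun c =>
            pvType c == some "Split" || pvType c == some "Grid" ||
            pvType c == some "Stack" || pvType c == some "FrameBox") = true := by
          rcases hT with ⟨c, hc, ht⟩; exact List.any_eq_true.mpr ⟨c, hc, by simp [ht]⟩
        obtain ⟨v, hv⟩ := Option.isSome_iff_exists.mp (by
          rw [← Option.ne_none_iff_isSome, Ne, find?_none_iff]; exact not_not.mpr hT)
        have hbest : children.foldl (fun a c => max a (pvRank (pvType c))) 0 = 2 :=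
          best_eq children 2
            (fun c hc => by
              by_contra h
              rcases (three_le_rank_iff (pvType c)).mp (by omega) with ht | ht
              exacts [hS ⟨c, hc, ht⟩, hG ⟨c, hc, ht⟩])
            (hT.imp fun c ⟨hc, ht⟩ => ⟨hc, (two_le_rank_iff _).mpr (Or.inr (Or.inr ht))⟩)
        simp [hany, hfS, hfG, hv, hbest]
      · have hfT := (find?_none_iff children (some "Stack")).mpr hT
        by_cases hF : ∃ c ∈ children, pvType c = some "FrameBox"
        · have hany : children.any (fun c =>
              pvType c == some "Split" || pvType c == some "Grid" ||
              pvType c == some "Stack" || pvType c == some "FrameBox") = true := by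
            rcases hF with ⟨c, hc, ht⟩; exact List.any_eq_true.mpr ⟨c, hc, by simp [ht]⟩
          have hbest : children.foldl (fun a c => max a (pvRank (pvType c))) 0 = 1 :=
            best_eq children 1
              (fun c hc => by
                by_contra h
                rcases (two_le_rank_iff (pvType c)).mp (by omega) with ht | ht | ht
                exacts [hS ⟨c, hc, ht⟩, hG ⟨c, hc, ht⟩, hT ⟨c, hc, ht⟩])
              (hF.imp fun c ⟨hc, ht⟩ =>
                ⟨hc, (one_le_rank_iff _).mpr (Or.inr (Or.inr (Or.inr ht)))⟩)
          simp [hany, hfS, hfG, hfT, hbest]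
        · have hany : children.any (fun c =>
              pvType c == some "Split" || pvType c == some "Grid" ||
              pvType c == some "Stack" || pvType c == some "FrameBox") = false := by
            rw [List.any_eq_false]
            intro c hc
            simp only [Bool.or_eq_true, beq_iff_eq, not_or]
            exact ⟨⟨⟨fun h => hS ⟨c, hc, h⟩, fun h => hG ⟨c, hc, h⟩⟩, fun h => hT ⟨c, hc, h⟩⟩,
              fun h => hF ⟨c, hc, h⟩⟩
          have hbest : children.foldl (fun a c => max a (pvRank (pvType c))) 0 = 0 := by
            rw [← Nat.le_zero]
            refine (foldl_max_le_iff children 0 0).mpr ⟨le_rfl, fun c hc => ?_⟩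
            by_contra h
            rcases (one_le_rank_iff (pvType c)).mp (by omega) with ht | ht | ht | ht
            exacts [hS ⟨c, hc, ht⟩, hG ⟨c, hc, ht⟩, hT ⟨c, hc, ht⟩, hF ⟨c, hc, ht⟩]
          simp [hany, hbest]
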